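-- pv_equiv track=rewrite | github.com/Jaiveer08/Careerlens | ai/role_predictor.py | predict_role
-- ===== SOURCE A (Python) =====
-- def predict_role(resume_text, role_skills_map):
--     """
--     Predict best matching role based on skill overlap
--     """
--     best_role = None
--     best_score = 0
--
--     resume_text = resume_text.lower()
--
--     for role, skills in role_skills_map.items():
--         match_count = 0
--
--         for skill in skills:
--             if skill.lower() in resume_text:
--                 match_count += 1
--
--         if match_count > best_score:
--             best_score = match_count
--             best_role = role
--
--     return best_role, best_score
-- ===== SOURCE B (Python) =====
-- def predict_role(resume_text, role_skills_map):
--     """Score every role first, then pick the first maximal one (None if no skill matches)."""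
--     text = resume_text.lower()
--     scores = {role: sum(1 for skill in skills if skill.lower() in text)
--               for role, skills in role_skills_map.items()}
--     if not scores:
--         return None, 0
--     best_role = max(scores, key=scores.get)
--     best_score = scores[best_role]
--     if best_score == 0:
--         return None, 0
--     return best_role, best_score
-- ===== Notes on version B (the rewrite author's own statement) =====
-- stated objective: simpler
-- what changed: Replaces the single running-best loop with two separated phases: a comprehension builds the full role->score table, then max(key=scores.get) selects the first-maximal role, with the all-zero/empty cases returning (None, 0).
import Mathlib
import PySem

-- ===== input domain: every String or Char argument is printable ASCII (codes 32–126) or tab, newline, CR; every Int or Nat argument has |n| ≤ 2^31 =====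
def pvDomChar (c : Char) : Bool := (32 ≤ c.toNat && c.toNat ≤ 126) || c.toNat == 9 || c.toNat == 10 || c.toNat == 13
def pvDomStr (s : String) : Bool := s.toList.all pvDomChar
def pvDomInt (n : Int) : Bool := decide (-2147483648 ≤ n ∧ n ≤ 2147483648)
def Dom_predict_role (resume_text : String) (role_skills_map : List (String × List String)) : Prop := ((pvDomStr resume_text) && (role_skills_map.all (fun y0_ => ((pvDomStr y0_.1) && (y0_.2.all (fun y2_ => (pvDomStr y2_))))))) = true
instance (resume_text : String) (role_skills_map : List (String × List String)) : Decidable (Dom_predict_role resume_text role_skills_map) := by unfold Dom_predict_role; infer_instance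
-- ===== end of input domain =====

-- B separates score-table construction from the max-selection pass instead of A's single running-best loop; objective: simpler.


-- ===== PORT A =====
-- literal port of A: one loop maintaining (best_role, best_score), inner loop counting matches
def predict_role (resume_text : String) (role_skills_map : List (String × List String)) : Option String × Int :=
  let text := PySem.Str.lower resume_text
  role_skills_map.foldl
    (fun (acc : Option String × Int) rs =>
      let match_count : Int :=
        rs.2.foldl (fun c skill => if PySem.Str.isIn (PySem.Str.lower skill) text then c + 1 else c) 0
      if match_count > acc.2 then (some rs.1, match_count) else acc)
    (none, 0)

-- ===== PORT B =====
-- literal port of B: build the full score table, then a max pass (first-wins), then the zero/empty special cases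
def predict_role_alt (resume_text : String) (role_skills_map : List (String × List String)) : Option String × Int :=
  let text := PySem.Str.lower resume_text
  let scores : List (String × Int) :=
    role_skills_map.map (fun rs =>
      (rs.1, (rs.2.countP (fun skill => PySem.Str.isIn (PySem.Str.lower skill) text) : Int)))
  match scores with
  | [] => (none, 0)
  | p :: rest =>
    let best := rest.foldl (fun acc q => if q.2 > acc.2 then q else acc) p
    if best.2 = 0 then (none, 0) else (some best.1, best.2)

-- ===== PRECONDITION & SPEC =====
def Spec_predict_role (resume_text : String) (role_skills_map : List (String × List String)) (out : Option String × Int) : Prop := out = predict_role_alt resume_text role_skills_map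
instance (resume_text : String) (role_skills_map : List (String × List String)) (out : Option String × Int) : Decidable (Spec_predict_role resume_text role_skills_map out) := by unfold Spec_predict_role; infer_instance

-- ===== CLAIM (what is proved, stated in full; the proofs are below) =====
def Claim_equal_predict_role : Prop := ∀ (resume_text : String) (role_skills_map : List (String × List String)), Dom_predict_role resume_text role_skills_map → Spec_predict_role resume_text role_skills_map (predict_role resume_text role_skills_map)

-- ===== LEMMAS AND PROOFS =====

-- A's running-best step on a precomputed (role, score) pair
def pvAstep (acc : Option String × Int) (q : String × Int) : Option String × Int :=
  if q.2 > acc.2 then (some q.1, q.2) else acc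

-- B's max step
def pvGstep (acc : String × Int) (q : String × Int) : String × Int :=
  if q.2 > acc.2 then q else acc

-- B's final zero-check
def pvFin (m : String × Int) : Option String × Int :=
  if m.2 = 0 then (none, 0) else (some m.1, m.2)

-- once the state is `some`, A's step is B's max step
theorem pvAstep_some (l : List (String × Int)) :
    ∀ r s, l.foldl pvAstep (some r, s) =
      (some (l.foldl pvGstep (r, s)).1, (l.foldl pvGstep (r, s)).2) := by
  induction l with
  | nil => intro r s; rfl
  | cons q t ih =>
    intro r s
    simp only [List.foldl_cons, pvAstep, pvGstep]
    by_cases h : q.2 > s <;> simp [h, ih]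

-- the max pass never decreases the score
theorem pvGstep_le (l : List (String × Int)) : ∀ a : String × Int, a.2 ≤ (l.foldl pvGstep a).2 := by
  induction l with
  | nil => intro a; exact le_refl _
  | cons q t ih =>
    intro a
    rw [List.foldl_cons]
    by_cases h : q.2 > a.2
    · have : pvGstep a q = q := by simp [pvGstep, h]
      rw [this]; exact le_trans (le_of_lt h) (ih q)
    · have : pvGstep a q = a := by simp [pvGstep, h]
      rw [this]; exact ih a

-- A's fold from (none, 0) equals B's max-then-zero-check, for any zero-scored seed
theorem pvA_eq_fin (l : List (String × Int)) :
    (∀ p ∈ l, 0 ≤ p.2) → ∀ r0 : String,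
      l.foldl pvAstep (none, 0) = pvFin (l.foldl pvGstep (r0, 0)) := by
  induction l with
  | nil => intro _ r0; rfl
  | cons q t ih =>
    intro hpos r0
    have hq : 0 ≤ q.2 := hpos q (List.mem_cons_self ..)
    have ht : ∀ p ∈ t, 0 ≤ p.2 := fun p hp => hpos p (List.mem_cons_of_mem _ hp)
    rw [List.foldl_cons, List.foldl_cons]
    by_cases h : q.2 > 0
    · have ha : pvAstep (none, 0) q = (some q.1, q.2) := by simp [pvAstep, h]
      have hg : pvGstep (r0, 0) q = q := by simp [pvGstep, h]
      rw [ha, hg, pvAstep_some]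
      have hle : q.2 ≤ (t.foldl pvGstep (q.1, q.2)).2 := pvGstep_le t (q.1, q.2)
      have hne : ¬ (t.foldl pvGstep (q.1, q.2)).2 = 0 := by omega
      simp [pvFin, hne]
    · have ha : pvAstep (none, 0) q = (none, 0) := by simp [pvAstep, h]
      have hg : pvGstep (r0, 0) q = (r0, 0) := by simp [pvGstep, h]
      rw [ha, hg]
      exact ih ht r0

-- the head step of B's fold absorbs a nonnegative head score
theorem pvHead (q : String × Int) (hq : 0 ≤ q.2) : pvGstep (q.1, 0) q = q := by
  by_cases h : q.2 > 0
  · simp [pvGstep, h]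
  · have h0 : q.2 = 0 := le_antisymm (not_lt.mp h) hq
    simp [pvGstep, Prod.ext_iff, h0]

-- ===== VERDICT (by name: the statement is the Claim_ definition above) =====
theorem predict_role_spec : Claim_equal_predict_role := by
  intro resume_text role_skills_map _
  unfold Spec_predict_role predict_role predict_role_alt
  simp only []
  set text := PySem.Str.lower resume_text with htext
  set pred := fun skill => PySem.Str.isIn (PySem.Str.lower skill) text with hpred
  set scores : List (String × Int) :=
    role_skills_map.map (fun rs => (rs.1, (rs.2.countP pred : Int))) with hscores
  have hA : role_skills_map.foldl
      (fun (acc : Option String × Int) rs =>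
        let match_count : Int :=
          rs.2.foldl (fun c skill => if pred skill then c + 1 else c) 0
        if match_count > acc.2 then (some rs.1, match_count) else acc)
      (none, 0) = scores.foldl pvAstep (none, 0) := by
    rw [hscores, List.foldl_map]
    apply PySem.List.foldl_congr_mem
    intro acc rs _
    have hc : rs.2.foldl (fun c skill => if pred skill then c + 1 else c) (0 : Int)
        = (rs.2.countP pred : Int) := by
      rw [PySem.List.foldl_if_add_one]; ring
    simp only [hc, pvAstep]
  rw [hA]
  have hpos : ∀ p ∈ scores, 0 ≤ p.2 := by
    intro p hp
    rw [hscores] at hp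
    obtain ⟨rs, _, rfl⟩ := List.mem_map.mp hp
    exact Int.natCast_nonneg _
  cases hs : scores with
  | nil => rfl
  | cons p rest =>
    rw [hs] at hpos
    have hq : 0 ≤ p.2 := hpos p (List.mem_cons_self ..)
    rw [pvA_eq_fin (p :: rest) hpos p.1, List.foldl_cons, pvHead p hq]
    rfl
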